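-- pv_equiv track=rewrite | github.com/Jonggil-dev/Algo | 정종길/프로그래머스/기타/퍼즐 조각 채우기.py | solution
-- ===== SOURCE A (Python) =====
-- from collections import deque
--
-- def solution(game_board, table):
--     answer = 0
--     n = len(table)
--     puzzles = []
--     holes = []
--
--     for i in range(n):
--         for j in range(n):
--             if table[i][j] == 1:
--                 puzzles.append(extract(i, j, table, 1, n))
--
--             if game_board[i][j] == 0:
--                 holes.append(extract(i, j, game_board, 0, n))
--
--     visited = [0] * len(puzzles)
--
--     for idx, puzzle in enumerate(puzzles):
--         if not visited[idx]:
--             for _ in range(4):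
--                 if puzzle in holes:
--                     answer += len(puzzle)
--                     visited[idx] = 1
--                     holes.pop(holes.index(puzzle))
--                     break
--
--                 else:
--                     puzzle = normalize(rotate(puzzle))
--     return answer
--
-- def extract(x, y, arr, num, n):
--     q = deque([(x, y)])
--     arr[x][y] = 2
--     res = [(0, 0)]
--
--     while q:
--         i, j = q.popleft()
--         for di, dj in (0, 1), (1, 0), (0, -1), (-1, 0):
--             ni, nj = i + di, j + dj
--             if 0 <= ni < n and 0 <= nj < n:
--                 if arr[ni][nj] == num:
--                     arr[ni][nj] = 2
--                     q.append((ni, nj))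
--                     res.append((ni - x, nj - y))
--
--     res = normalize(res)
--
--     return res
--
-- def rotate(puzzle):
--     res = []
--     for i, j in puzzle:
--         res.append((j, -i))
--     return res
--
-- def normalize(puzzle):
--     min_x = min(puzzle, key=lambda x: x[0])[0]
--     min_y = min(puzzle, key=lambda x: x[1])[1]
--
--     res = []
--
--     for x, y in puzzle:
--         nx, ny = x - min_x, y - min_y
--         res.append((nx, ny))
--
--     res.sort(key=lambda x: x[0])
--     res.sort(key=lambda x: x[1])
--     return res
-- ===== SOURCE B (Python) =====
-- from collections import deque
--
--
-- def solution(game_board, table):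
--     # B matches shapes by a rotation-invariant CANONICAL key (the lexicographic
--     # minimum of the four rotations' normalized forms): hole keys are counted in
--     # a dict in one pass over game_board, then each piece is matched by a single
--     # lookup/decrement of its own canonical key -- no rotation trials against a
--     # holes list at match time.  (Like A, this marks visited cells in both grids.)
--     n = len(table)
--     holes = {}
--     for i in range(n):
--         for j in range(n):
--             if game_board[i][j] == 0:
--                 k = canonical(extract(i, j, game_board, 0, n))
--                 holes[k] = holes.get(k, 0) + 1
--
--     answer = 0
--     for i in range(n):
--         for j in range(n):
--             if table[i][j] == 1:
--                 cells = extract(i, j, table, 1, n)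
--                 k = canonical(cells)
--                 if holes.get(k, 0):
--                     holes[k] -= 1
--                     answer += len(cells)
--     return answer
--
--
-- def canonical(cells):
--     # lexicographically smallest among the normalized forms of the 4 rotations,
--     # each rotation taken directly on the raw cell offsets
--     best = None
--     for _ in range(4):
--         shape = tuple(normalize(cells))
--         if best is None or shape < best:
--             best = shape
--         cells = [(y, -x) for x, y in cells]
--     return best
--
--
-- def extract(x, y, arr, num, n):
--     # flood fill collecting the component's raw offsets (NOT normalized)
--     q = deque([(x, y)])
--     arr[x][y] = 2
--     res = [(0, 0)]
--
--     while q: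
--         i, j = q.popleft()
--         for di, dj in (0, 1), (1, 0), (0, -1), (-1, 0):
--             ni, nj = i + di, j + dj
--             if 0 <= ni < n and 0 <= nj < n:
--                 if arr[ni][nj] == num:
--                     arr[ni][nj] = 2
--                     q.append((ni, nj))
--                     res.append((ni - x, nj - y))
--
--     return res
--
--
-- def normalize(puzzle):
--     min_x = min(puzzle, key=lambda x: x[0])[0]
--     min_y = min(puzzle, key=lambda x: x[1])[1]
--
--     res = []
--
--     for x, y in puzzle:
--         nx, ny = x - min_x, y - min_y
--         res.append((nx, ny))
--
--     res.sort(key=lambda x: x[0])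
--     res.sort(key=lambda x: x[1])
--     return res
-- ===== Notes on version B (the rewrite author's own statement) =====
-- stated objective: alternative
-- what changed: B matches shapes by a rotation-invariant canonical key (the lexicographic minimum of the four rotations' normalized forms): hole keys are counted in a dict in one pass, and each piece is matched by a single lookup/decrement of its own canonical key, instead of A's per-piece rotate-and-retry loop with linear in/index/pop scans over a holes list.
import Mathlib
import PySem

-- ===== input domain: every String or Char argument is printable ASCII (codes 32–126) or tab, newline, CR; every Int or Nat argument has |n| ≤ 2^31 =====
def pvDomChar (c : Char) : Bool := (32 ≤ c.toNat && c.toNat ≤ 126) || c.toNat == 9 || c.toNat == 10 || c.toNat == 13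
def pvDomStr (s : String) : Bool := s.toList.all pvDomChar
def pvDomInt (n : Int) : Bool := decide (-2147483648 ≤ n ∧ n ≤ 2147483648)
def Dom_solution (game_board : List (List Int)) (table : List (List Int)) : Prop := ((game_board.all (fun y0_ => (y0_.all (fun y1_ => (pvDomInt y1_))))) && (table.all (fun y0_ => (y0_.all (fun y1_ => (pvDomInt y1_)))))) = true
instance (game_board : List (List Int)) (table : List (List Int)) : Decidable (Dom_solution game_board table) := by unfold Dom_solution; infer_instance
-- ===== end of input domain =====

-- B matches shapes by a rotation-invariant CANONICAL key (lexicographic minimum of the four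
-- rotations' normalized forms), counting hole keys in a dict and matching each piece by one
-- lookup/decrement — instead of A's per-piece rotate-and-retry loop with linear scans over a
-- holes list (objective: alternative).  Both Pythons mutate the two input grids identically;
-- the equivalence proved is about the return value.  The flood fill and normalize are the same
-- source lines in Source A and Source B, so both ports share their transliterations below.

-- ===== SHARED HELPERS (identical source lines in Source A and Source B) =====

-- arr[i][j] read / write; indices are produced by range(n) and the BFS bound check, so they are
-- in range on every input admitted by Pre_solution (the defaults are never used there)
def pzGet (g : List (List Int)) (i j : Int) : Int :=
  PySem.List.pyGetD (PySem.List.pyGetD g i []) j 0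

def pzSet (g : List (List Int)) (i j v : Int) : List (List Int) :=
  PySem.List.pySetD g i (PySem.List.pySetD (PySem.List.pyGetD g i []) j v)

-- def normalize(puzzle) — min(puzzle, key=…)[0] is the first minimal element's component;
-- the [] branch is Python's ValueError of min on an empty list, never reached (shapes are nonempty)
def pzNormalize (p : List (Int × Int)) : List (Int × Int) :=
  match PySem.List.min? p (fun q => q.1), PySem.List.min? p (fun q => q.2) with
  | some mx, some my =>
      PySem.List.sorted
        (PySem.List.sorted
          (p.foldl (fun acc q => acc ++ [(q.1 - mx.1, q.2 - my.2)]) [])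
          (fun q => q.1))
        (fun q => q.2)
  | _, _ => []

-- the `while q:` BFS of extract; state (arr, q, res).  The fuel only makes the loop total:
-- every append marks a distinct cell from num (0 or 1, never 2) to 2, so the loop runs at most
-- n*n+1 iterations and the fuel passed by pzExtractRaw is never exhausted.
def pzExtractLoop : Nat → List (Int × Int) → List (List Int) → Int → Int → Int → Int →
    List (Int × Int) → List (Int × Int) × List (List Int)
  | 0, _, arr, _, _, _, _, res => (res, arr)
  | _ + 1, [], arr, _, _, _, _, res => (res, arr)
  | fuel + 1, ij :: q, arr, num, n, x, y, res =>
      let st := [((0:Int), (1:Int)), (1, 0), (0, -1), (-1, 0)].foldl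
        (fun (st : List (List Int) × List (Int × Int) × List (Int × Int)) d =>
          let ni := ij.1 + d.1
          let nj := ij.2 + d.2
          if 0 ≤ ni ∧ ni < n ∧ 0 ≤ nj ∧ nj < n then
            if pzGet st.1 ni nj == num then
              (pzSet st.1 ni nj 2, st.2.1 ++ [(ni, nj)], st.2.2 ++ [(ni - x, nj - y)])
            else st
          else st)
        (arr, q, res)
      pzExtractLoop fuel st.2.1 st.1 num n x y st.2.2

-- the flood fill collecting the raw offsets (Source B's extract; Source A's extract body before normalize);
-- returns (raw offsets, mutated arr)
def pzExtractRaw (x y : Int) (arr : List (List Int)) (num n : Int) :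
    List (Int × Int) × List (List Int) :=
  let arr1 := pzSet arr x y 2
  pzExtractLoop (n.toNat * n.toNat + 1) [(x, y)] arr1 num n x y [(0, 0)]

-- ===== PORT A =====

-- def rotate(puzzle)
def pzRotate (p : List (Int × Int)) : List (Int × Int) :=
  p.foldl (fun acc q => acc ++ [(q.2, -q.1)]) []

-- def extract(x, y, arr, num, n) of Source A — returns (normalized shape, mutated arr)
def pzExtract (x y : Int) (arr : List (List Int)) (num n : Int) :
    List (Int × Int) × List (List Int) :=
  let r := pzExtractRaw x y arr num n
  (pzNormalize r.1, r.2)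

-- the two independent `if`s of A's building loop, on their own variables
def buildStepT (n : Int) (s : List (List Int) × List (List (Int × Int))) (ij : Int × Int) :
    List (List Int) × List (List (Int × Int)) :=
  if pzGet s.1 ij.1 ij.2 == 1 then
    let e := pzExtract ij.1 ij.2 s.1 1 n
    (e.2, s.2 ++ [e.1])
  else s

def buildStepG (n : Int) (s : List (List Int) × List (List (Int × Int))) (ij : Int × Int) :
    List (List Int) × List (List (Int × Int)) :=
  if pzGet s.1 ij.1 ij.2 == 0 then
    let e := pzExtract ij.1 ij.2 s.1 0 n
    (e.2, s.2 ++ [e.1])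
  else s

-- A's `for _ in range(4):` over one puzzle; state (answer, holes, visited)
def matchA : Nat → List (Int × Int) → Int → Int × List (List (Int × Int)) × List Int →
    Int × List (List (Int × Int)) × List Int
  | 0, _, _, st => st
  | k + 1, p, idx, st =>
      if st.2.1.contains p then
        (st.1 + PySem.List.len p,
         ((PySem.List.pop? st.2.1 (((PySem.List.index? st.2.1 p).getD 0 : Nat) : Int)).map
            Prod.snd).getD st.2.1,
         PySem.List.pySetD st.2.2 idx 1)
      else matchA k (pzNormalize (pzRotate p)) idx st

def solution (game_board : List (List Int)) (table : List (List Int)) : Int :=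
  let n := PySem.List.len table
  let built := (PySem.List.pyRange 0 n 1).foldl
    (fun st i => (PySem.List.pyRange 0 n 1).foldl
      (fun st j => (buildStepT n st.1 (i, j), buildStepG n st.2 (i, j))) st)
    ((table, []), (game_board, []))
  let puzzles := built.1.2
  let holes := built.2.2
  let visited : List Int := List.replicate puzzles.length 0
  let fin := (PySem.List.enumerate puzzles).foldl
    (fun (st : Int × List (List (Int × Int)) × List Int) ip =>
      if PySem.List.pyGetD st.2.2 ip.1 0 == 0 then matchA 4 ip.2 ip.1 st else st)
    (0, holes, visited)
  fin.1

-- ===== PORT B =====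

-- Python's `<` on tuples of pairs (lexicographic; pairs compared lexicographically)
def pzPairLt (a b : Int × Int) : Bool :=
  a.1 < b.1 || (a.1 == b.1 && a.2 < b.2)

def pzListLt : List (Int × Int) → List (Int × Int) → Bool
  | [], [] => false
  | [], _ :: _ => true
  | _ :: _, [] => false
  | x :: xs, y :: ys => if x = y then pzListLt xs ys else pzPairLt x y

-- def canonical(cells) of Source B: lexicographically smallest among the normalized forms of the
-- 4 rotations (the .getD [] default is the unreachable best-is-None case)
def pzCanon (cells : List (Int × Int)) : List (Int × Int) :=
  ((List.range 4).foldl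
    (fun (st : Option (List (Int × Int)) × List (Int × Int)) _ =>
      let shape := pzNormalize st.2
      ((match st.1 with
        | none => some shape
        | some b => if pzListLt shape b then some shape else some b),
       st.2.map (fun q => (q.2, -q.1))))
    (none, cells)).1.getD []

def solution_alt (game_board : List (List Int)) (table : List (List Int)) : Int :=
  let n := PySem.List.len table
  let ph1 := (PySem.List.pyRange 0 n 1).foldl
    (fun st i => (PySem.List.pyRange 0 n 1).foldl
      (fun (st : List (List Int) × PySem.Dict (List (Int × Int)) Int) j =>
        if pzGet st.1 i j == 0 then
          let e := pzExtractRaw i j st.1 0 n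
          let k := pzCanon e.1
          (e.2, st.2.insert k (PySem.Dict.getD st.2 k 0 + 1))
        else st) st)
    (game_board, PySem.Dict.empty)
  let fin := (PySem.List.pyRange 0 n 1).foldl
    (fun st i => (PySem.List.pyRange 0 n 1).foldl
      (fun (st : Int × List (List Int) × PySem.Dict (List (Int × Int)) Int) j =>
        if pzGet st.2.1 i j == 1 then
          let e := pzExtractRaw i j st.2.1 1 n
          let k := pzCanon e.1
          if ¬ (PySem.Dict.getD st.2.2 k 0 == 0) then
            (st.1 + PySem.List.len e.1, e.2, st.2.2.insert k (PySem.Dict.getD st.2.2 k 0 - 1))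
          else (st.1, e.2, st.2.2)
        else st) st)
    ((0 : Int), table, ph1.2)
  fin.1

-- ===== PRECONDITION & SPEC =====
-- Pre_solution is exactly the set of inputs Python A returns on: with n = len(table), A reads
-- table[i][j] and game_board[i][j] for all 0 ≤ i, j < n, and raises IndexError iff game_board
-- has fewer than n rows or one of the first n rows of either grid is shorter than n.
def Pre_solution (game_board : List (List Int)) (table : List (List Int)) : Prop :=
  table.length ≤ game_board.length ∧
  (∀ r ∈ table, table.length ≤ r.length) ∧
  (∀ r ∈ game_board.take table.length, table.length ≤ r.length)
instance (game_board : List (List Int)) (table : List (List Int)) :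
    Decidable (Pre_solution game_board table) := by unfold Pre_solution; infer_instance

def pvWitness_solution : List (List Int) × List (List Int) :=
  ([[1, 0], [1, 1]], [[1, 0], [0, 0]])

def Spec_solution (game_board : List (List Int)) (table : List (List Int)) (out : Int) : Prop :=
  out = solution_alt game_board table
instance (game_board : List (List Int)) (table : List (List Int)) (out : Int) :
    Decidable (Spec_solution game_board table out) := by unfold Spec_solution; infer_instance

-- ===== CLAIM (what is proved, stated in full; the proofs are below) =====
def Claim_equal_solution : Prop := ∀ (game_board : List (List Int)) (table : List (List Int)), Dom_solution game_board table → Pre_solution game_board table → Spec_solution game_board table (solution game_board table)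

-- ===== LEMMAS AND PROOFS =====

-- ---- the order pzListLt is a strict total order ----

theorem pairLt_irrefl (a : Int × Int) : pzPairLt a a = false := by
  simp [pzPairLt]

theorem pairLt_asymm {a b : Int × Int} (h : pzPairLt a b = true) : pzPairLt b a = false := by
  simp [pzPairLt] at *; omega

theorem pairLt_trans {a b c : Int × Int} (h1 : pzPairLt a b = true) (h2 : pzPairLt b c = true) :
    pzPairLt a c = true := by
  simp [pzPairLt] at *; omega

theorem pairLt_conn {a b : Int × Int} (h1 : pzPairLt a b = false) (h2 : pzPairLt b a = false) :
    a = b := by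
  simp [pzPairLt] at *
  have := h1.2; have := h2.2
  obtain ⟨a1, a2⟩ := a; obtain ⟨b1, b2⟩ := b
  simp_all; omega

theorem listLt_irrefl (a : List (Int × Int)) : pzListLt a a = false := by
  induction a with
  | nil => rfl
  | cons x xs ih => simp [pzListLt, ih]

theorem listLt_asymm {a b : List (Int × Int)} (h : pzListLt a b = true) :
    pzListLt b a = false := by
  induction a generalizing b with
  | nil => cases b with
    | nil => simpa [pzListLt] using h
    | cons y ys => simp [pzListLt]
  | cons x xs ih => cases b with
    | nil => simp [pzListLt] at h
    | cons y ys =>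
        by_cases hxy : x = y
        · subst hxy
          simp only [pzListLt, if_pos rfl] at h ⊢
          exact ih h
        · simp only [pzListLt, if_neg hxy, if_neg (Ne.symm hxy)] at h ⊢
          simpa using pairLt_asymm h

theorem listLt_trans {a b c : List (Int × Int)} (h1 : pzListLt a b = true)
    (h2 : pzListLt b c = true) : pzListLt a c = true := by
  induction a generalizing b c with
  | nil => cases c with
    | nil => cases b with
      | nil => exact h1
      | cons y ys => simp [pzListLt] at h2
    | cons z zs => simp [pzListLt]
  | cons x xs ih =>
      cases b with
      | nil => simp [pzListLt] at h1
      | cons y ys =>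
        cases c with
        | nil => simp [pzListLt] at h2
        | cons z zs =>
            by_cases hxy : x = y <;> by_cases hyz : y = z
            · subst hxy; subst hyz
              simp only [pzListLt, if_pos rfl] at h1 h2 ⊢
              exact ih h1 h2
            · subst hxy
              simp_all [pzListLt]
            · subst hyz
              simp only [pzListLt, if_neg hxy] at h1 ⊢
              exact h1
            · by_cases hxz : x = z
              · subst hxz
                simp only [pzListLt, if_neg hxy] at h1
                simp only [pzListLt, if_neg hyz] at h2
                exfalso
                have h3 := pairLt_trans h1 h2
                rw [pairLt_irrefl] at h3; exact absurd h3 (by simp)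
              · simp only [pzListLt, if_neg hxy] at h1
                simp only [pzListLt, if_neg hyz] at h2
                simp only [pzListLt, if_neg hxz]
                exact pairLt_trans h1 h2

theorem listLt_conn {a b : List (Int × Int)} (h1 : pzListLt a b = false)
    (h2 : pzListLt b a = false) : a = b := by
  induction a generalizing b with
  | nil => cases b with
    | nil => rfl
    | cons y ys => simp [pzListLt] at h1
  | cons x xs ih =>
      cases b with
      | nil => simp [pzListLt] at h2
      | cons y ys =>
          by_cases hxy : x = y
          · subst hxy
            simp only [pzListLt, if_pos rfl] at h1 h2
            rw [ih h1 h2]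
          · simp only [pzListLt, if_neg hxy, if_neg (Ne.symm hxy)] at h1 h2
            exact absurd (pairLt_conn h1 h2) hxy

-- ---- min-of-candidates machinery ----

def pzStep (b s : List (Int × Int)) : List (Int × Int) :=
  if pzListLt s b then s else b

-- r = normalize ∘ rotate (A's rotation step on a normalized shape)
def rN (p : List (Int × Int)) : List (Int × Int) := pzNormalize (pzRotate p)

def rIter : Nat → List (Int × Int) → List (Int × Int)
  | 0, p => p
  | k + 1, p => rIter k (rN p)

-- the canonical form: lexicographic minimum of the four rotations of a normalized shape
def pzC (p : List (Int × Int)) : List (Int × Int) :=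
  pzStep (pzStep (pzStep p (rIter 1 p)) (rIter 2 p)) (rIter 3 p)

theorem step_cases (b s : List (Int × Int)) : pzStep b s = b ∨ pzStep b s = s := by
  unfold pzStep; split_ifs <;> simp

theorem step_min (b s : List (Int × Int)) :
    pzListLt s (pzStep b s) = false ∧ pzListLt b (pzStep b s) = false := by
  unfold pzStep
  split_ifs with h
  · exact ⟨listLt_irrefl s, listLt_asymm h⟩
  · exact ⟨by simpa using h, listLt_irrefl b⟩

theorem step_min_trans {x b s : List (Int × Int)} (hx : pzListLt x b = false) :
    pzListLt x (pzStep b s) = false := by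
  unfold pzStep
  split_ifs with h
  · by_contra hc
    have hc' : pzListLt x s = true := by simpa using hc
    have := listLt_trans hc' h
    rw [this] at hx; exact absurd hx (by simp)
  · exact hx

theorem pzC_mem (p : List (Int × Int)) : ∃ a, a ≤ 3 ∧ pzC p = rIter a p := by
  unfold pzC
  rcases step_cases (pzStep (pzStep p (rIter 1 p)) (rIter 2 p)) (rIter 3 p) with h3 | h3
  · rcases step_cases (pzStep p (rIter 1 p)) (rIter 2 p) with h2 | h2
    · rcases step_cases p (rIter 1 p) with h1 | h1
      · exact ⟨0, by omega, by rw [h3, h2, h1]; rfl⟩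
      · exact ⟨1, by omega, by rw [h3, h2, h1]⟩
    · exact ⟨2, by omega, by rw [h3, h2]⟩
  · exact ⟨3, by omega, h3⟩

theorem pzC_min (p : List (Int × Int)) :
    ∀ x ∈ [p, rIter 1 p, rIter 2 p, rIter 3 p], pzListLt x (pzC p) = false := by
  intro x hx
  unfold pzC
  simp only [List.mem_cons, List.not_mem_nil, or_false] at hx
  rcases hx with rfl | rfl | rfl | rfl
  · exact step_min_trans (step_min_trans (step_min _ _).2)
  · exact step_min_trans (step_min_trans (step_min _ _).1)
  · exact step_min_trans (step_min _ _).1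
  · exact (step_min _ _).1

theorem min_unique {l : List (List (Int × Int))} {m m' : List (Int × Int)}
    (hm : m ∈ l) (hm' : m' ∈ l)
    (h1 : ∀ x ∈ l, pzListLt x m = false) (h2 : ∀ x ∈ l, pzListLt x m' = false) : m = m' := by
  exact listLt_conn (h2 m hm) (h1 m' hm')

-- ---- normalize: characterization, permutation and translation invariance ----

def shiftL (a b : Int) (p : List (Int × Int)) : List (Int × Int) :=
  p.map (fun q => (q.1 - a, q.2 - b))

def sortYX (l : List (Int × Int)) : List (Int × Int) :=
  PySem.List.sorted (PySem.List.sorted l (fun q => q.1) false) (fun q => q.2) false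

def minF (p : List (Int × Int)) : Int := ((PySem.List.min? p (fun q => q.1)).getD (0, 0)).1
def minS (p : List (Int × Int)) : Int := ((PySem.List.min? p (fun q => q.2)).getD (0, 0)).2

theorem min?_fst_some {p : List (Int × Int)} (hp : p ≠ []) :
    ∃ mx, PySem.List.min? p (fun q => q.1) = some mx := by
  cases h : PySem.List.min? p (fun q => q.1) with
  | none => exact absurd ((PySem.List.min?_eq_none_iff _ _).mp h) hp
  | some m => exact ⟨m, rfl⟩

theorem min?_snd_some {p : List (Int × Int)} (hp : p ≠ []) :
    ∃ my, PySem.List.min? p (fun q => q.2) = some my := by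
  cases h : PySem.List.min? p (fun q => q.2) with
  | none => exact absurd ((PySem.List.min?_eq_none_iff _ _).mp h) hp
  | some m => exact ⟨m, rfl⟩

theorem pzNormalize_spec {p : List (Int × Int)} (hp : p ≠ []) :
    pzNormalize p = sortYX (shiftL (minF p) (minS p) p) := by
  obtain ⟨mx, hmx⟩ := min?_fst_some hp
  obtain ⟨my, hmy⟩ := min?_snd_some hp
  unfold pzNormalize sortYX shiftL minF minS
  rw [hmx, hmy]
  simp only [Option.getD_some]
  rw [PySem.List.foldl_append_singleton_eq_map]
  simp

theorem minF_spec {p : List (Int × Int)} (hp : p ≠ []) :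
    (∃ q ∈ p, q.1 = minF p) ∧ ∀ q ∈ p, minF p ≤ q.1 := by
  obtain ⟨mx, hmx⟩ := min?_fst_some hp
  have h1 := PySem.List.min?_mem hmx
  have h2 := PySem.List.min?_isMin hmx
  unfold minF
  rw [hmx]
  exact ⟨⟨mx, h1, rfl⟩, fun q hq => h2 q hq⟩

theorem minS_spec {p : List (Int × Int)} (hp : p ≠ []) :
    (∃ q ∈ p, q.2 = minS p) ∧ ∀ q ∈ p, minS p ≤ q.2 := by
  obtain ⟨my, hmy⟩ := min?_snd_some hp
  have h1 := PySem.List.min?_mem hmy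
  have h2 := PySem.List.min?_isMin hmy
  unfold minS
  rw [hmy]
  exact ⟨⟨my, h1, rfl⟩, fun q hq => h2 q hq⟩

theorem minF_congr {p q : List (Int × Int)} (hp : p ≠ []) (hq : q ≠ [])
    (hmem : ∀ x, x ∈ p ↔ x ∈ q) : minF p = minF q := by
  obtain ⟨⟨a, ha, hav⟩, hmin⟩ := minF_spec hp
  obtain ⟨⟨b, hb, hbv⟩, hmin'⟩ := minF_spec hq
  have h1 := hmin b ((hmem b).mpr hb)
  have h2 := hmin' a ((hmem a).mp ha)
  omega

theorem minS_congr {p q : List (Int × Int)} (hp : p ≠ []) (hq : q ≠ [])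
    (hmem : ∀ x, x ∈ p ↔ x ∈ q) : minS p = minS q := by
  obtain ⟨⟨a, ha, hav⟩, hmin⟩ := minS_spec hp
  obtain ⟨⟨b, hb, hbv⟩, hmin'⟩ := minS_spec hq
  have h1 := hmin b ((hmem b).mpr hb)
  have h2 := hmin' a ((hmem a).mp ha)
  omega

-- stability of PySem.List.sorted: sorting an already k1-ordered list by k2 orders it by (k2, k1)
theorem insertBy_pairwise (k1 k2 : Int × Int → Int) (x : Int × Int)
    (acc : List (Int × Int))
    (hpw : acc.Pairwise (fun a b => k2 a < k2 b ∨ (k2 a = k2 b ∧ k1 a ≤ k1 b)))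
    (hk1 : ∀ a ∈ acc, k1 a ≤ k1 x) :
    (PySem.List.insertBy (fun a b => decide (k2 a < k2 b)) x acc).Pairwise
      (fun a b => k2 a < k2 b ∨ (k2 a = k2 b ∧ k1 a ≤ k1 b)) := by
  induction acc with
  | nil => simp [PySem.List.insertBy]
  | cons y ys ih =>
      rw [show PySem.List.insertBy (fun a b => decide (k2 a < k2 b)) x (y :: ys)
          = if (decide (k2 x < k2 y) : Bool) = true then x :: y :: ys
            else y :: PySem.List.insertBy (fun a b => decide (k2 a < k2 b)) x ys from rfl]
      rcases List.pairwise_cons.mp hpw with ⟨hy, hys⟩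
      split_ifs with hlt
      · rw [decide_eq_true_iff] at hlt
        refine List.pairwise_cons.mpr ⟨?_, hpw⟩
        intro z hz
        rcases List.mem_cons.mp hz with rfl | hz
        · exact Or.inl hlt
        · rcases hy z hz with h' | h'
          · exact Or.inl (lt_trans hlt h')
          · exact Or.inl (lt_of_lt_of_le hlt (le_of_eq h'.1))
      · rw [decide_eq_true_iff] at hlt
        push_neg at hlt
        refine List.pairwise_cons.mpr ⟨?_, ih hys (fun a ha => hk1 a (List.mem_cons_of_mem y ha))⟩
        intro z hz
        rcases (PySem.List.mem_insertBy _ _ _ _).mp hz with rfl | hz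
        · rcases lt_or_eq_of_le hlt with h' | h'
          · exact Or.inl h'
          · exact Or.inr ⟨h', hk1 y (List.mem_cons_self)⟩
        · exact hy z hz

theorem foldl_insertBy_pairwise (k1 k2 : Int × Int → Int) (xs acc : List (Int × Int))
    (hxs : xs.Pairwise (fun a b => k1 a ≤ k1 b))
    (hacc : acc.Pairwise (fun a b => k2 a < k2 b ∨ (k2 a = k2 b ∧ k1 a ≤ k1 b)))
    (hcross : ∀ a ∈ acc, ∀ x ∈ xs, k1 a ≤ k1 x) :
    (xs.foldl (fun acc x => PySem.List.insertBy (fun a b => decide (k2 a < k2 b)) x acc)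
        acc).Pairwise
      (fun a b => k2 a < k2 b ∨ (k2 a = k2 b ∧ k1 a ≤ k1 b)) := by
  induction xs generalizing acc with
  | nil => exact hacc
  | cons x xs ih =>
      rw [List.foldl_cons]
      rcases List.pairwise_cons.mp hxs with ⟨hx, hxs'⟩
      refine ih _ hxs'
        (insertBy_pairwise k1 k2 x acc hacc (fun a ha => hcross a ha x List.mem_cons_self)) ?_
      intro a ha x' hx'
      rcases (PySem.List.mem_insertBy _ _ _ _).mp ha with rfl | ha
      · exact hx x' hx'
      · exact hcross a ha x' (List.mem_cons_of_mem x hx')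

theorem stable_sorted_pairwise (k1 k2 : Int × Int → Int) (xs : List (Int × Int))
    (h : xs.Pairwise (fun a b => k1 a ≤ k1 b)) :
    (PySem.List.sorted xs k2 false).Pairwise
      (fun a b => k2 a < k2 b ∨ (k2 a = k2 b ∧ k1 a ≤ k1 b)) := by
  rw [PySem.List.sorted_eq_foldl_insertBy]
  exact foldl_insertBy_pairwise k1 k2 xs [] h List.Pairwise.nil (by simp)

theorem sortYX_pairwise (l : List (Int × Int)) :
    (sortYX l).Pairwise (fun a b => a.2 < b.2 ∨ (a.2 = b.2 ∧ a.1 ≤ b.1)) := by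
  exact stable_sorted_pairwise (fun q => q.1) (fun q => q.2) _
    (PySem.List.sorted_pairwise l (fun q => q.1))

theorem sortYX_perm (l : List (Int × Int)) : (sortYX l).Perm l := by
  exact (PySem.List.sorted_perm _ _ _).trans (PySem.List.sorted_perm _ _ _)

theorem sortYX_eq_of_perm {l1 l2 : List (Int × Int)} (h : l1.Perm l2) :
    sortYX l1 = sortYX l2 := by
  refine List.eq_of_perm_of_sorted ?_ (sortYX_pairwise l1) (sortYX_pairwise l2)
    (((sortYX_perm l1).trans h).trans (sortYX_perm l2).symm)
  rintro ⟨a1, a2⟩ ⟨b1, b2⟩ - - hab hba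
  rcases hab with h' | ⟨h1, h2⟩ <;> rcases hba with h'' | ⟨h3, h4⟩ <;>
    simp_all <;> omega

theorem norm_perm {p q : List (Int × Int)} (h : p.Perm q) (hp : p ≠ []) :
    pzNormalize p = pzNormalize q := by
  have hq : q ≠ [] := fun hq => hp (List.Perm.eq_nil (hq ▸ h))
  have hmem : ∀ x, x ∈ p ↔ x ∈ q := fun x => h.mem_iff
  rw [pzNormalize_spec hp, pzNormalize_spec hq, minF_congr hp hq hmem, minS_congr hp hq hmem]
  exact sortYX_eq_of_perm (h.map _)

theorem minF_shiftL (a b : Int) {p : List (Int × Int)} (hp : p ≠ []) :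
    minF (shiftL a b p) = minF p - a := by
  have hp' : shiftL a b p ≠ [] := by simp [shiftL, hp]
  obtain ⟨⟨u, hu, huv⟩, hmin⟩ := minF_spec hp'
  obtain ⟨⟨v, hv, hvv⟩, hmin'⟩ := minF_spec hp
  obtain ⟨u0, hu0, rfl⟩ := List.mem_map.mp hu
  have h1 : minF p ≤ u0.1 := hmin' u0 hu0
  have h2 : minF (shiftL a b p) ≤ v.1 - a := by
    have : (v.1 - a, v.2 - b) ∈ shiftL a b p := List.mem_map.mpr ⟨v, hv, rfl⟩
    exact hmin _ this
  simp at huv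
  omega

theorem minS_shiftL (a b : Int) {p : List (Int × Int)} (hp : p ≠ []) :
    minS (shiftL a b p) = minS p - b := by
  have hp' : shiftL a b p ≠ [] := by simp [shiftL, hp]
  obtain ⟨⟨u, hu, huv⟩, hmin⟩ := minS_spec hp'
  obtain ⟨⟨v, hv, hvv⟩, hmin'⟩ := minS_spec hp
  obtain ⟨u0, hu0, rfl⟩ := List.mem_map.mp hu
  have h1 : minS p ≤ u0.2 := hmin' u0 hu0
  have h2 : minS (shiftL a b p) ≤ v.2 - b := by
    have : (v.1 - a, v.2 - b) ∈ shiftL a b p := List.mem_map.mpr ⟨v, hv, rfl⟩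
    exact hmin _ this
  simp at huv
  omega

theorem shiftL_shiftL (a b c d : Int) (p : List (Int × Int)) :
    shiftL c d (shiftL a b p) = shiftL (a + c) (b + d) p := by
  simp only [shiftL, List.map_map]
  apply List.map_congr_left
  intro q _
  simp only [Function.comp_apply, Prod.mk.injEq]
  constructor <;> ring

theorem norm_translate (a b : Int) {p : List (Int × Int)} (hp : p ≠ []) :
    pzNormalize (shiftL a b p) = pzNormalize p := by
  have hp' : shiftL a b p ≠ [] := by simp [shiftL, hp]
  rw [pzNormalize_spec hp', pzNormalize_spec hp, minF_shiftL a b hp, minS_shiftL a b hp,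
    shiftL_shiftL]
  congr 2 <;> omega

theorem length_norm {p : List (Int × Int)} (hp : p ≠ []) :
    (pzNormalize p).length = p.length := by
  rw [pzNormalize_spec hp]
  unfold sortYX shiftL
  rw [PySem.List.length_sorted, PySem.List.length_sorted, List.length_map]

theorem norm_ne_nil {p : List (Int × Int)} (hp : p ≠ []) : pzNormalize p ≠ [] := by
  intro h
  have := length_norm hp
  rw [h] at this
  exact hp (List.length_eq_zero_iff.mp this.symm)

-- ---- rotation ----

def rotL (p : List (Int × Int)) : List (Int × Int) := p.map (fun q => (q.2, -q.1))

def rotIter : Nat → List (Int × Int) → List (Int × Int)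
  | 0, p => p
  | k + 1, p => rotIter k (rotL p)

theorem pzRotate_eq (p : List (Int × Int)) : pzRotate p = rotL p := by
  unfold pzRotate rotL
  exact (PySem.List.foldl_append_singleton_eq_map _ p []).trans (by simp)

theorem rotL_shiftL (a b : Int) (p : List (Int × Int)) :
    rotL (shiftL a b p) = shiftL b (-a) (rotL p) := by
  simp only [rotL, shiftL, List.map_map]
  apply List.map_congr_left
  intro q _
  simp only [Function.comp_apply, Prod.mk.injEq]
  exact ⟨trivial, by ring⟩

theorem rotL_ne_nil {p : List (Int × Int)} (hp : p ≠ []) : rotL p ≠ [] := by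
  simp [rotL, hp]

theorem rN_norm {p : List (Int × Int)} (hp : p ≠ []) :
    rN (pzNormalize p) = pzNormalize (rotL p) := by
  unfold rN
  rw [pzRotate_eq]
  have hperm : (rotL (pzNormalize p)).Perm (rotL (shiftL (minF p) (minS p) p)) := by
    apply List.Perm.map
    rw [pzNormalize_spec hp]
    exact sortYX_perm _
  have hne : rotL (pzNormalize p) ≠ [] := rotL_ne_nil (norm_ne_nil hp)
  rw [norm_perm hperm hne, rotL_shiftL, norm_translate _ _ (rotL_ne_nil hp)]

theorem rIter_norm (k : Nat) {p : List (Int × Int)} (hp : p ≠ []) :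
    rIter k (pzNormalize p) = pzNormalize (rotIter k p) := by
  induction k generalizing p with
  | zero => rfl
  | succ k ih =>
      show rIter k (rN (pzNormalize p)) = pzNormalize (rotIter k (rotL p))
      rw [rN_norm hp, ih (rotL_ne_nil hp)]

theorem rotIter4 (p : List (Int × Int)) : rotIter 4 p = p := by
  show rotL (rotL (rotL (rotL p))) = p
  simp only [rotL, List.map_map]
  have : ((fun q : Int × Int => (q.2, -q.1)) ∘ (fun q : Int × Int => (q.2, -q.1)) ∘
      (fun q : Int × Int => (q.2, -q.1)) ∘ (fun q : Int × Int => (q.2, -q.1)))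
      = fun q : Int × Int => q := by
    funext q
    simp [Function.comp]
  rw [this, List.map_id']

-- ---- normalized-form shapes ----

def NF (p : List (Int × Int)) : Prop := ∃ s, s ≠ [] ∧ p = pzNormalize s

theorem NF_rN {p : List (Int × Int)} (h : NF p) : NF (rN p) := by
  obtain ⟨s, hs, rfl⟩ := h
  exact ⟨rotL s, by simpa [rotL] using hs, rN_norm hs⟩

theorem rIter4_id {p : List (Int × Int)} (h : NF p) : rIter 4 p = p := by
  obtain ⟨s, hs, rfl⟩ := h
  rw [rIter_norm 4 hs, rotIter4]

theorem rIter_add (a b : Nat) (p : List (Int × Int)) :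
    rIter (b + a) p = rIter a (rIter b p) := by
  induction b generalizing p with
  | zero => simp [rIter]
  | succ b ih =>
      rw [Nat.succ_add]
      show rIter (b + a) (rN p) = rIter a (rIter b (rN p))
      exact ih (rN p)

theorem length_rN {p : List (Int × Int)} (h : NF p) : (rN p).length = p.length := by
  obtain ⟨s, hs, rfl⟩ := h
  rw [rN_norm hs, length_norm (by simpa [rotL] using hs), length_norm hs, rotL, List.length_map]

theorem len_rN {p : List (Int × Int)} (h : NF p) : PySem.List.len (rN p) = PySem.List.len p := by
  simp [PySem.List.len, length_rN h]

-- ---- the canonical form is rotation invariant ----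

theorem pzC_rN {pp : List (Int × Int)} (h : NF pp) : pzC (rN pp) = pzC pp := by
  have h4 : rIter 4 pp = pp := rIter4_id h
  have hmem : pzC (rN pp) ∈ [pp, rIter 1 pp, rIter 2 pp, rIter 3 pp] := by
    obtain ⟨a, ha, hc⟩ := pzC_mem (rN pp)
    have hsucc : ∀ b : Nat, rIter b (rN pp) = rIter (b + 1) pp := by
      intro b; rfl
    have ha4 : a = 0 ∨ a = 1 ∨ a = 2 ∨ a = 3 := by omega
    rcases ha4 with rfl | rfl | rfl | rfl <;>
      rw [hc, hsucc] <;> simp [h4]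
  have hmin : ∀ x ∈ [pp, rIter 1 pp, rIter 2 pp, rIter 3 pp],
      pzListLt x (pzC (rN pp)) = false := by
    have hm := pzC_min (rN pp)
    intro x hx
    simp only [List.mem_cons, List.not_mem_nil, or_false] at hx
    rcases hx with rfl | rfl | rfl | rfl
    · exact hm _ (by
        simp only [List.mem_cons]
        right; right; right; left
        conv_lhs => rw [← h4]
        rfl)
    · exact hm _ (by simp only [List.mem_cons]; left; rfl)
    · exact hm _ (by simp only [List.mem_cons]; right; left; rfl)
    · exact hm _ (by simp only [List.mem_cons]; right; right; left; rfl)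
  obtain ⟨a, ha, hc⟩ := pzC_mem pp
  have hmemp : pzC pp ∈ [pp, rIter 1 pp, rIter 2 pp, rIter 3 pp] := by
    have ha4 : a = 0 ∨ a = 1 ∨ a = 2 ∨ a = 3 := by omega
    rcases ha4 with rfl | rfl | rfl | rfl <;> rw [hc] <;> simp [rIter]
  exact min_unique hmem hmemp hmin (pzC_min pp)

theorem pzC_rIter (k : Nat) {p : List (Int × Int)} (h : NF p) : pzC (rIter k p) = pzC p := by
  induction k generalizing p with
  | zero => rfl
  | succ k ih => rw [rIter, ih (NF_rN h), pzC_rN h]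

theorem match_iff {p h : List (Int × Int)} (hp : NF p) (hh : NF h) :
    (∃ k < 4, rIter k p = h) ↔ pzC p = pzC h := by
  constructor
  · rintro ⟨k, _, rfl⟩
    exact (pzC_rIter k hp).symm
  · intro hc
    obtain ⟨a, ha, hca⟩ := pzC_mem p
    obtain ⟨b, hb, hcb⟩ := pzC_mem h
    have heq : rIter a p = rIter b h := by rw [← hca, ← hcb, hc]
    have h4 : rIter 4 h = h := rIter4_id hh
    have hp4 : rIter 4 p = p := rIter4_id hp
    have kh : h = rIter (a + (4 - b)) p := by
      have : rIter (b + (4 - b)) h = rIter (4 - b) (rIter b h) := rIter_add _ _ _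
      rw [show b + (4 - b) = 4 by omega, h4] at this
      rw [this, ← heq, ← rIter_add]
    by_cases hlt : a + (4 - b) < 4
    · exact ⟨a + (4 - b), hlt, kh.symm⟩
    · refine ⟨a + (4 - b) - 4, by omega, ?_⟩
      have m4 : a + (4 - b) = 4 + (a + (4 - b) - 4) := by omega
      have h5 : rIter (4 + (a + (4 - b) - 4)) p = rIter (a + (4 - b) - 4) (rIter 4 p) :=
        rIter_add _ _ _
      rw [hp4] at h5
      rw [kh]
      conv_rhs => rw [m4]
      rw [h5]

-- ---- canonical of raw cells ----

theorem canon_eq {cells : List (Int × Int)} (hc : cells ≠ []) :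
    pzCanon cells = pzC (pzNormalize cells) := by
  unfold pzCanon
  rw [show List.range 4 = [0, 1, 2, 3] from rfl]
  simp only [List.foldl_cons, List.foldl_nil]
  rw [← apply_ite some]
  dsimp only
  rw [← apply_ite some]
  dsimp only
  rw [← apply_ite some]
  dsimp only [Option.getD]
  unfold pzC pzStep
  rw [rIter_norm 1 hc, rIter_norm 2 hc, rIter_norm 3 hc]
  rfl

-- ---- flood fill: the raw offsets list is nonempty ----

theorem dirs_res_prefix (ds : List (Int × Int)) (ij : Int × Int) (num n x y : Int)
    (arr : List (List Int)) (q res : List (Int × Int)) :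
    ∃ t, (ds.foldl
        (fun (st : List (List Int) × List (Int × Int) × List (Int × Int)) d =>
          let ni := ij.1 + d.1
          let nj := ij.2 + d.2
          if 0 ≤ ni ∧ ni < n ∧ 0 ≤ nj ∧ nj < n then
            if pzGet st.1 ni nj == num then
              (pzSet st.1 ni nj 2, st.2.1 ++ [(ni, nj)], st.2.2 ++ [(ni - x, nj - y)])
            else st
          else st)
        (arr, q, res)).2.2 = res ++ t := by
  induction ds generalizing arr q res with
  | nil => exact ⟨[], by simp⟩
  | cons d ds ih =>
      rw [List.foldl_cons]
      dsimp only
      split_ifs with h1 h2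
      · obtain ⟨t, ht⟩ := ih (pzSet arr (ij.1 + d.1) (ij.2 + d.2) 2) (q ++ [(ij.1 + d.1, ij.2 + d.2)])
          (res ++ [(ij.1 + d.1 - x, ij.2 + d.2 - y)])
        exact ⟨(ij.1 + d.1 - x, ij.2 + d.2 - y) :: t, by rw [ht]; simp⟩
      · exact ih arr q res
      · exact ih arr q res

theorem extractLoop_prefix (fuel : Nat) (q : List (Int × Int)) (arr : List (List Int))
    (num n x y : Int) (res : List (Int × Int)) :
    ∃ t, (pzExtractLoop fuel q arr num n x y res).1 = res ++ t := by
  induction fuel generalizing q arr res with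
  | zero => exact ⟨[], by simp [pzExtractLoop]⟩
  | succ fuel ih =>
      cases q with
      | nil => exact ⟨[], by simp [pzExtractLoop]⟩
      | cons ij q =>
          rw [pzExtractLoop]
          obtain ⟨t1, ht1⟩ := dirs_res_prefix [((0:Int), (1:Int)), (1, 0), (0, -1), (-1, 0)]
            ij num n x y arr q res
          obtain ⟨t2, ht2⟩ := ih _ _ _
          exact ⟨t1 ++ t2, by rw [ht2, ht1, List.append_assoc]⟩

theorem extractRaw_ne_nil (x y : Int) (arr : List (List Int)) (num n : Int) :
    (pzExtractRaw x y arr num n).1 ≠ [] := by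
  obtain ⟨t, ht⟩ := extractLoop_prefix (n.toNat * n.toNat + 1) [(x, y)] (pzSet arr x y 2)
    num n x y [(0, 0)]
  unfold pzExtractRaw
  simp only [ht]
  simp

theorem extract_NF (x y : Int) (arr : List (List Int)) (num n : Int) :
    NF (pzExtract x y arr num n).1 :=
  ⟨(pzExtractRaw x y arr num n).1, extractRaw_ne_nil x y arr num n, rfl⟩

-- ---- A's matching loop: summary ----

-- holes.pop(holes.index(p)) removes the first occurrence of p
theorem pop_index_erase {α : Type} [BEq α] [LawfulBEq α] (l : List α) (p : α) (hp : p ∈ l) :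
    ((PySem.List.pop? l (((PySem.List.index? l p).getD 0 : Nat) : Int)).map Prod.snd).getD l
      = l.erase p := by
  induction l with
  | nil => cases hp
  | cons h t ih =>
      by_cases hh : h == p
      · simp [PySem.List.index?, PySem.List.pop?, PySem.List.pyIdx?, List.idxOf?_cons,
          eq_of_beq hh]
      · have hpt : p ∈ t := by
          rcases List.mem_cons.mp hp with h1 | h1
          · exact absurd (beq_iff_eq.mpr h1.symm) hh
          · exact h1
        obtain ⟨k, hk⟩ : ∃ k, PySem.List.index? t p = some k := by
          cases hidx : PySem.List.index? t p with
          | none => exact absurd (List.idxOf?_eq_none_iff.mp hidx) (by simp [hpt])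
          | some k => exact ⟨k, rfl⟩
        have hklt : k < t.length := by
          obtain ⟨h1, -⟩ := List.idxOf?_eq_some_iff.mp hk
          exact h1
        have hht : (h == p) = false := by simpa using hh
        have hcons : PySem.List.index? (h :: t) p = some (k + 1) := by
          simp only [PySem.List.index?, List.idxOf?_cons, hht, Bool.false_eq_true, if_false]
          rw [(by exact hk : List.idxOf? p t = some k)]
          rfl
        have hpopt : PySem.List.pop? t ((k : Nat) : Int) = some (t[k]'hklt, t.eraseIdx k) := by
          simp [PySem.List.pop?, PySem.List.pyIdx?, Nat.cast_lt, hklt]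
        have ht' : t.eraseIdx k = t.erase p := by
          have h2 := ih hpt
          rw [hk] at h2
          simpa [hpopt] using h2
        have hpop : PySem.List.pop? (h :: t) (((k + 1 : Nat) : Int)) =
            some (t[k]'hklt, h :: t.eraseIdx k) := by
          have hlt : ((k : Int) + 1) < ((t.length : Int) + 1) := by
            exact_mod_cast Nat.succ_lt_succ hklt
          have h0 : (0 : Int) ≤ (k : Int) + 1 := by positivity
          simp [PySem.List.pop?, PySem.List.pyIdx?, hlt, h0,
            Nat.succ_lt_succ hklt, List.eraseIdx_cons_succ]
        rw [hcons]
        simp only [Option.getD_some]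
        rw [hpop]
        simp [hht, ht']

theorem matchA_spec (k : Nat) (p : List (Int × Int)) (hp : NF p) (idx ans : Int)
    (hl : List (List (Int × Int))) (vis : List Int) :
    ((∃ j < k, rIter j p ∈ hl) → ∃ v, v ∈ hl ∧ pzC v = pzC p ∧
        matchA k p idx (ans, hl, vis)
          = (ans + PySem.List.len p, hl.erase v, PySem.List.pySetD vis idx 1)) ∧
    ((¬ ∃ j < k, rIter j p ∈ hl) → matchA k p idx (ans, hl, vis) = (ans, hl, vis)) := by
  induction k generalizing p hp with
  | zero =>
      constructor
      · rintro ⟨j, hj, -⟩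
        exact absurd hj (Nat.not_lt_zero j)
      · intro _; rfl
  | succ k ih =>
      by_cases hmem : p ∈ hl
      · have hcont : hl.contains p = true := by simpa using hmem
        constructor
        · intro _
          refine ⟨p, hmem, rfl, ?_⟩
          rw [matchA]
          simp only [hcont, if_true]
          rw [pop_index_erase hl p hmem]
        · intro hno
          exact absurd ⟨0, by omega, hmem⟩ hno
      · have hcont : hl.contains p = false := by simpa using hmem
        have hrw : matchA (k + 1) p idx (ans, hl, vis)
            = matchA k (rN p) idx (ans, hl, vis) := by
          rw [matchA]
          simp only [hcont, Bool.false_eq_true, if_false]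
          rfl
        have hiff : (∃ j < k + 1, rIter j p ∈ hl) ↔ (∃ j < k, rIter j (rN p) ∈ hl) := by
          constructor
          · rintro ⟨j, hj, hjm⟩
            cases j with
            | zero => exact absurd hjm hmem
            | succ j => exact ⟨j, by omega, hjm⟩
          · rintro ⟨j, hj, hjm⟩
            exact ⟨j + 1, by omega, hjm⟩
        obtain ⟨ih1, ih2⟩ := ih (rN p) (NF_rN hp)
        constructor
        · intro hex
          obtain ⟨v, hv, hcv, heq⟩ := ih1 (hiff.mp hex)
          refine ⟨v, hv, by rw [hcv, pzC_rN hp], ?_⟩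
          rw [hrw, heq, len_rN hp]
        · intro hno
          rw [hrw]
          exact ih2 (fun hex => hno (hiff.mpr hex))

-- ---- counting relation between A's holes list and B's canonical counter ----

def CntRel (hl : List (List (Int × Int))) (c : PySem.Dict (List (Int × Int)) Int) : Prop :=
  ∀ key, PySem.Dict.getD c key 0 = (hl.countP (fun h => pzC h == key) : Int)

theorem exists_rot_mem_iff {p : List (Int × Int)} {hl : List (List (Int × Int))}
    (hp : NF p) (hhl : ∀ h ∈ hl, NF h) :
    (∃ j < 4, rIter j p ∈ hl) ↔ hl.countP (fun h => pzC h == pzC p) ≠ 0 := by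
  constructor
  · rintro ⟨j, hj, hjm⟩
    have hpos : 0 < hl.countP (fun h => pzC h == pzC p) :=
      List.countP_pos_iff.mpr ⟨rIter j p, hjm, by simp [pzC_rIter j hp]⟩
    omega
  · intro hcnt
    obtain ⟨h, hh, hch⟩ := List.countP_pos_iff.mp (Nat.pos_of_ne_zero hcnt)
    have hch' : pzC h = pzC p := by simpa using hch
    obtain ⟨kk, hk4, hkeq⟩ := (match_iff hp (hhl h hh)).mpr hch'.symm
    exact ⟨kk, hk4, hkeq ▸ hh⟩

-- B's per-piece step on the abstract (answer, counter) state
def bStep (st : Int × PySem.Dict (List (Int × Int)) Int) (p : List (Int × Int)) :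
    Int × PySem.Dict (List (Int × Int)) Int :=
  if ¬ (PySem.Dict.getD st.2 (pzC p) 0 == 0) then
    (st.1 + PySem.List.len p, st.2.insert (pzC p) (PySem.Dict.getD st.2 (pzC p) 0 - 1))
  else st

theorem matchA_bStep (p : List (Int × Int)) (hp : NF p) (idx ans : Int)
    (hl : List (List (Int × Int))) (vis : List Int)
    (c : PySem.Dict (List (Int × Int)) Int)
    (hR : CntRel hl c) (hhl : ∀ h ∈ hl, NF h) :
    (matchA 4 p idx (ans, hl, vis)).1 = (bStep (ans, c) p).1 ∧
    CntRel (matchA 4 p idx (ans, hl, vis)).2.1 (bStep (ans, c) p).2 ∧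
    (∀ h ∈ (matchA 4 p idx (ans, hl, vis)).2.1, NF h) ∧
    ((matchA 4 p idx (ans, hl, vis)).2.2 = vis ∨
      (matchA 4 p idx (ans, hl, vis)).2.2 = PySem.List.pySetD vis idx 1) := by
  have hcnt := hR (pzC p)
  by_cases hz : hl.countP (fun h => pzC h == pzC p) = 0
  · have hne : ¬ ∃ j < 4, rIter j p ∈ hl := by
      rw [exists_rot_mem_iff hp hhl]
      simpa using hz
    have heq := (matchA_spec 4 p hp idx ans hl vis).2 hne
    have hbz : (PySem.Dict.getD c (pzC p) 0 == 0) = true := by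
      rw [hcnt, hz]; rfl
    have hbs : bStep (ans, c) p = (ans, c) := by
      unfold bStep
      rw [if_neg (not_not_intro hbz)]
    rw [heq, hbs]
    exact ⟨rfl, hR, hhl, Or.inl rfl⟩
  · have hex := (exists_rot_mem_iff hp hhl).mpr hz
    obtain ⟨v, hv, hcv, heq⟩ := (matchA_spec 4 p hp idx ans hl vis).1 hex
    have hbnz : ¬ ((PySem.Dict.getD c (pzC p) 0 == 0) = true) := by
      rw [hcnt]
      simp only [beq_iff_eq, Int.natCast_eq_zero]
      exact hz
    have hperm : hl.Perm (v :: hl.erase v) := List.perm_cons_erase hv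
    have hbs : bStep (ans, c) p
        = (ans + PySem.List.len p,
           c.insert (pzC p) (PySem.Dict.getD c (pzC p) 0 - 1)) := by
      unfold bStep
      rw [if_pos hbnz]
    rw [heq, hbs]
    refine ⟨rfl, ?_, ?_, Or.inr rfl⟩
    · intro key
      rw [PySem.Dict.getD_insert]
      by_cases hk : key = pzC p
      · subst hk
        rw [if_pos rfl, hcnt]
        have hcp : (hl.erase v).countP (fun h => pzC h == pzC p)
            = hl.countP (fun h => pzC h == pzC p) - 1 := by
          rw [hperm.countP_eq]
          simp [hcv]
        rw [hcp]
        have : 0 < hl.countP (fun h => pzC h == pzC p) := Nat.pos_of_ne_zero hz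
        omega
      · rw [if_neg hk, hR key]
        have hvk : (pzC v == key) = false := by
          simp only [beq_eq_false_iff_ne, ne_eq, hcv]
          exact fun hh => hk hh.symm
        congr 1
        rw [hperm.countP_eq]
        simp [hvk]
    · intro h hh
      exact hhl h (List.mem_of_mem_erase hh)

-- ---- build phase lemmas (as in the ports' nested loops) ----

-- a nested for-i/for-j fold is the fold over the flattened position list
theorem nested_foldl {σ : Type} (f : σ → Int → Int → σ) (rows cols : List Int) (init : σ) :
    rows.foldl (fun st i => cols.foldl (fun st j => f st i j) st) init
      = (rows.flatMap (fun i => cols.map (fun j => (i, j)))).foldl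
          (fun st ij => f st ij.1 ij.2) init := by
  induction rows generalizing init with
  | nil => rfl
  | cons r rs ih => simp [List.flatMap_cons, List.foldl_append, List.foldl_map, ih]

-- A's building loop over both boards is the pair of its two independent loops
theorem build_split (n : Int) (l : List (Int × Int))
    (s1 s2 : List (List Int) × List (List (Int × Int))) :
    l.foldl (fun st ij => (buildStepT n st.1 (ij.1, ij.2), buildStepG n st.2 (ij.1, ij.2)))
        (s1, s2)
      = (l.foldl (buildStepT n) s1, l.foldl (buildStepG n) s2) := by
  induction l generalizing s1 s2 with
  | nil => rfl
  | cons ij l ih =>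
      simp only [List.foldl_cons]
      exact ih _ _

-- the puzzles accumulator of the building fold appends
theorem buildT_acc (n : Int) (l : List (Int × Int)) (t : List (List Int))
    (acc : List (List (Int × Int))) :
    l.foldl (buildStepT n) (t, acc)
      = ((l.foldl (buildStepT n) (t, [])).1, acc ++ (l.foldl (buildStepT n) (t, [])).2) := by
  induction l generalizing t acc with
  | nil => simp
  | cons ij l ih =>
      rw [List.foldl_cons, List.foldl_cons]
      by_cases h : pzGet t ij.1 ij.2 == 1
      · rw [show buildStepT n (t, acc) ij
              = ((pzExtract ij.1 ij.2 t 1 n).2, acc ++ [(pzExtract ij.1 ij.2 t 1 n).1]) from by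
            simp [buildStepT, h],
          show buildStepT n (t, []) ij
              = ((pzExtract ij.1 ij.2 t 1 n).2, [(pzExtract ij.1 ij.2 t 1 n).1]) from by
            simp [buildStepT, h]]
        rw [ih _ (acc ++ [_]), ih _ ([_])]
        simp
      · rw [show buildStepT n (t, acc) ij = (t, acc) from by simp [buildStepT, h],
          show buildStepT n (t, []) ij = (t, []) from by simp [buildStepT, h]]
        exact ih t acc

theorem buildT_NF (n : Int) (l : List (Int × Int)) (t : List (List Int))
    (acc : List (List (Int × Int))) (hacc : ∀ p ∈ acc, NF p) :
    ∀ p ∈ (l.foldl (buildStepT n) (t, acc)).2, NF p := by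
  induction l generalizing t acc with
  | nil => exact hacc
  | cons ij l ih =>
      rw [List.foldl_cons]
      unfold buildStepT
      split_ifs with h
      · exact ih _ _ (by
          intro p hp
          rcases List.mem_append.mp hp with h1 | h1
          · exact hacc p h1
          · rw [List.mem_singleton.mp h1]
            exact extract_NF _ _ _ _ _)
      · exact ih _ _ hacc

-- B's second phase is: build A's puzzles list, then fold bStep over it
theorem fuse (n : Int) (l : List (Int × Int)) (tbl : List (List Int)) (ans : Int)
    (c : PySem.Dict (List (Int × Int)) Int) :
    l.foldl
      (fun (st : Int × List (List Int) × PySem.Dict (List (Int × Int)) Int) ij =>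
        if pzGet st.2.1 ij.1 ij.2 == 1 then
          (if ¬ (PySem.Dict.getD st.2.2
                (pzCanon (pzExtractRaw ij.1 ij.2 st.2.1 1 n).1) 0 == 0) then
            (st.1 + PySem.List.len (pzExtractRaw ij.1 ij.2 st.2.1 1 n).1,
             (pzExtractRaw ij.1 ij.2 st.2.1 1 n).2,
             st.2.2.insert (pzCanon (pzExtractRaw ij.1 ij.2 st.2.1 1 n).1)
               (PySem.Dict.getD st.2.2 (pzCanon (pzExtractRaw ij.1 ij.2 st.2.1 1 n).1) 0 - 1))
          else (st.1, (pzExtractRaw ij.1 ij.2 st.2.1 1 n).2, st.2.2))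
        else st)
      (ans, tbl, c)
      = ((((l.foldl (buildStepT n) (tbl, [])).2).foldl bStep (ans, c)).1,
         (l.foldl (buildStepT n) (tbl, [])).1,
         (((l.foldl (buildStepT n) (tbl, [])).2).foldl bStep (ans, c)).2) := by
  induction l generalizing tbl ans c with
  | nil => rfl
  | cons ij l ih =>
      rw [List.foldl_cons, List.foldl_cons]
      by_cases h : pzGet tbl ij.1 ij.2 == 1
      · simp only [h, if_true]
        rw [show buildStepT n (tbl, []) ij
              = ((pzExtract ij.1 ij.2 tbl 1 n).2, [(pzExtract ij.1 ij.2 tbl 1 n).1]) from by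
            simp [buildStepT, h]]
        rw [buildT_acc n l _ [_]]
        simp only [List.singleton_append, List.foldl_cons]
        have hne := extractRaw_ne_nil ij.1 ij.2 tbl 1 n
        have hkey : pzCanon (pzExtractRaw ij.1 ij.2 tbl 1 n).1
            = pzC (pzExtract ij.1 ij.2 tbl 1 n).1 := canon_eq hne
        have hlen : PySem.List.len (pzExtractRaw ij.1 ij.2 tbl 1 n).1
            = PySem.List.len (pzExtract ij.1 ij.2 tbl 1 n).1 := by
          show _ = PySem.List.len (pzNormalize _)
          simp [PySem.List.len, length_norm hne]
        rw [hkey, hlen]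
        by_cases hc : (PySem.Dict.getD c (pzC (pzExtract ij.1 ij.2 tbl 1 n).1) 0 == 0) = true
        · rw [if_neg (not_not_intro hc)]
          have hbs : bStep (ans, c) (pzExtract ij.1 ij.2 tbl 1 n).1 = (ans, c) := by
            unfold bStep
            rw [if_neg (not_not_intro hc)]
          rw [hbs, ih]
          rfl
        · rw [if_pos hc]
          have hbs : bStep (ans, c) (pzExtract ij.1 ij.2 tbl 1 n).1
              = (ans + PySem.List.len (pzExtract ij.1 ij.2 tbl 1 n).1,
                 c.insert (pzC (pzExtract ij.1 ij.2 tbl 1 n).1)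
                   (PySem.Dict.getD c (pzC (pzExtract ij.1 ij.2 tbl 1 n).1) 0 - 1)) := by
            unfold bStep
            rw [if_pos hc]
          rw [hbs, ih]
          rfl
      · simp only [h, Bool.false_eq_true, if_false]
        rw [show buildStepT n (tbl, []) ij = (tbl, []) from by simp [buildStepT, h]]
        exact ih tbl ans c

-- B's first phase keeps CntRel and NF with A's holes fold
theorem ph1_rel (n : Int) (l : List (Int × Int)) (gb : List (List Int))
    (hl : List (List (Int × Int))) (c : PySem.Dict (List (Int × Int)) Int)
    (hR : CntRel hl c) (hNF : ∀ h ∈ hl, NF h) :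
    (l.foldl
        (fun (st : List (List Int) × PySem.Dict (List (Int × Int)) Int) ij =>
          if pzGet st.1 ij.1 ij.2 == 0 then
            ((pzExtractRaw ij.1 ij.2 st.1 0 n).2,
             st.2.insert (pzCanon (pzExtractRaw ij.1 ij.2 st.1 0 n).1)
               (PySem.Dict.getD st.2 (pzCanon (pzExtractRaw ij.1 ij.2 st.1 0 n).1) 0 + 1))
          else st)
        (gb, c)).1 = (l.foldl (buildStepG n) (gb, hl)).1 ∧
    CntRel (l.foldl (buildStepG n) (gb, hl)).2
      (l.foldl
        (fun (st : List (List Int) × PySem.Dict (List (Int × Int)) Int) ij =>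
          if pzGet st.1 ij.1 ij.2 == 0 then
            ((pzExtractRaw ij.1 ij.2 st.1 0 n).2,
             st.2.insert (pzCanon (pzExtractRaw ij.1 ij.2 st.1 0 n).1)
               (PySem.Dict.getD st.2 (pzCanon (pzExtractRaw ij.1 ij.2 st.1 0 n).1) 0 + 1))
          else st)
        (gb, c)).2 ∧
    (∀ h ∈ (l.foldl (buildStepG n) (gb, hl)).2, NF h) := by
  induction l generalizing gb hl c with
  | nil => exact ⟨rfl, hR, hNF⟩
  | cons ij l ih =>
      rw [List.foldl_cons, List.foldl_cons]
      by_cases h : pzGet gb ij.1 ij.2 == 0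
      · simp only [h, if_true]
        rw [show buildStepG n (gb, hl) ij
              = ((pzExtract ij.1 ij.2 gb 0 n).2, hl ++ [(pzExtract ij.1 ij.2 gb 0 n).1]) from by
            simp [buildStepG, h]]
        have hne := extractRaw_ne_nil ij.1 ij.2 gb 0 n
        have hkey : pzCanon (pzExtractRaw ij.1 ij.2 gb 0 n).1
            = pzC (pzExtract ij.1 ij.2 gb 0 n).1 := canon_eq hne
        rw [hkey]
        apply ih
        · intro key'
          rw [PySem.Dict.getD_insert, List.countP_append]
          by_cases hk : key' = pzC (pzExtract ij.1 ij.2 gb 0 n).1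
          · subst hk
            rw [if_pos rfl, hR]
            simp
          · rw [if_neg hk, hR key']
            have hvk : (pzC (pzExtract ij.1 ij.2 gb 0 n).1 == key') = false := by
              simp only [beq_eq_false_iff_ne, ne_eq]
              exact fun hh => hk hh.symm
            simp [hvk]
        · intro h0 hmem
          rcases List.mem_append.mp hmem with h1 | h1
          · exact hNF h0 h1
          · rw [List.mem_singleton.mp h1]
            exact extract_NF _ _ _ _ _
      · simp only [h, Bool.false_eq_true, if_false]
        rw [show buildStepG n (gb, hl) ij = (gb, hl) from by simp [buildStepG, h]]
        exact ih _ _ _ hR hNF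

-- visited entries at positions not yet processed stay 0
theorem pyGetD_pySetD_gt (vis : List Int) (k0 m : Int) (h0 : 0 ≤ k0) (hm : k0 < m) :
    PySem.List.pyGetD (PySem.List.pySetD vis k0 1) m 0 = PySem.List.pyGetD vis m 0 := by
  rw [PySem.List.pySetD_of_nonneg vis 1 h0, PySem.List.pyGetD, PySem.List.pyGetD,
    PySem.List.pyGet?_of_nonneg _ (by omega : (0:Int) ≤ m),
    PySem.List.pyGet?_of_nonneg _ (by omega : (0:Int) ≤ m),
    List.getElem?_set_ne (by omega)]

-- the fresh visited list reads 0 everywhere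
theorem pyGetD_replicate_zero (k : Nat) (m : Int) (hm : 0 ≤ m) :
    PySem.List.pyGetD (List.replicate k (0 : Int)) m 0 = 0 := by
  rw [PySem.List.pyGetD, PySem.List.pyGet?_of_nonneg _ hm]
  rcases lt_or_ge m.toNat k with h | h
  · simp [h]
  · rw [List.getElem?_eq_none (by simpa using h : (List.replicate k (0:Int)).length ≤ m.toNat)]
    rfl

-- A's enumerated matching fold returns the same answer as the bStep fold over the puzzles
theorem match_fold (ps : List (List (Int × Int))) (k0 ans : Int)
    (hl : List (List (Int × Int))) (vis : List Int) (c : PySem.Dict (List (Int × Int)) Int)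
    (hk0 : 0 ≤ k0) (hR : CntRel hl c) (hNFp : ∀ p ∈ ps, NF p) (hNFh : ∀ h ∈ hl, NF h)
    (hvis : ∀ m : Int, k0 ≤ m → PySem.List.pyGetD vis m 0 = 0) :
    ((PySem.List.enumerate ps k0).foldl
        (fun (st : Int × List (List (Int × Int)) × List Int) ip =>
          if PySem.List.pyGetD st.2.2 ip.1 0 == 0 then matchA 4 ip.2 ip.1 st else st)
        (ans, hl, vis)).1
      = (ps.foldl bStep (ans, c)).1 := by
  induction ps generalizing k0 ans hl vis c with
  | nil => rfl
  | cons p ps ih =>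
      have hcons : PySem.List.enumerate (p :: ps) k0
          = (k0, p) :: PySem.List.enumerate ps (k0 + 1) := rfl
      rw [hcons, List.foldl_cons, List.foldl_cons]
      have hg : (PySem.List.pyGetD vis k0 0 == 0) = true := by rw [hvis k0 le_rfl]; rfl
      simp only [hg, if_true]
      obtain ⟨h1, h2, h3, h4⟩ :=
        matchA_bStep p (hNFp p List.mem_cons_self) k0 ans hl vis c hR hNFh
      have ha : matchA 4 p k0 (ans, hl, vis)
          = ((bStep (ans, c) p).1, (matchA 4 p k0 (ans, hl, vis)).2.1,
             (matchA 4 p k0 (ans, hl, vis)).2.2) := by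
        rw [← h1]
      rw [ha]
      exact ih (k0 + 1) (bStep (ans, c) p).1 _ _ (bStep (ans, c) p).2 (by omega) h2
        (fun q hq => hNFp q (List.mem_cons_of_mem p hq)) h3
        (by
          intro m hm
          rcases h4 with h4 | h4 <;> rw [h4]
          · exact hvis m (by omega)
          · rw [pyGetD_pySetD_gt vis k0 m hk0 (by omega)]
            exact hvis m (by omega))

-- ===== VERDICT (by name: the statement is the Claim_ definition above) =====
theorem solution_spec : Claim_equal_solution := by
  intro gb tbl _ _
  show solution gb tbl = solution_alt gb tbl
  simp only [solution, solution_alt]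
  rw [nested_foldl (f := fun st i j =>
        (buildStepT (PySem.List.len tbl) st.1 (i, j), buildStepG (PySem.List.len tbl) st.2 (i, j))),
      nested_foldl (f := fun (st : List (List Int) × PySem.Dict (List (Int × Int)) Int) i j =>
        if pzGet st.1 i j == 0 then
          ((pzExtractRaw i j st.1 0 (PySem.List.len tbl)).2,
           st.2.insert (pzCanon (pzExtractRaw i j st.1 0 (PySem.List.len tbl)).1)
             (st.2.getD (pzCanon (pzExtractRaw i j st.1 0 (PySem.List.len tbl)).1) 0 + 1))
        else st),
      nested_foldl (f := fun (st : Int × List (List Int) × PySem.Dict (List (Int × Int)) Int) i j =>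
        if pzGet st.2.1 i j == 1 then
          (if ¬ (PySem.Dict.getD st.2.2 (pzCanon (pzExtractRaw i j st.2.1 1 (PySem.List.len tbl)).1) 0 == 0) then
            (st.1 + PySem.List.len (pzExtractRaw i j st.2.1 1 (PySem.List.len tbl)).1,
             (pzExtractRaw i j st.2.1 1 (PySem.List.len tbl)).2,
             st.2.2.insert (pzCanon (pzExtractRaw i j st.2.1 1 (PySem.List.len tbl)).1)
               (PySem.Dict.getD st.2.2 (pzCanon (pzExtractRaw i j st.2.1 1 (PySem.List.len tbl)).1) 0 - 1))
          else (st.1, (pzExtractRaw i j st.2.1 1 (PySem.List.len tbl)).2, st.2.2))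
        else st)]
  rw [build_split]
  rw [fuse]
  obtain ⟨-, hb2, hb3⟩ := ph1_rel (PySem.List.len tbl)
      ((PySem.List.pyRange 0 (PySem.List.len tbl) 1).flatMap
        (fun i => (PySem.List.pyRange 0 (PySem.List.len tbl) 1).map (fun j => (i, j))))
      gb [] PySem.Dict.empty (fun key => by simp [PySem.Dict.getD_empty])
      (by intro h hh; cases hh)
  exact match_fold _ 0 0 _ _ _ le_rfl hb2
    (buildT_NF _ _ _ _ (by intro p hp; cases hp)) hb3
    (fun m hm => pyGetD_replicate_zero _ m hm)
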